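-- pv_equiv track=rewrite | github.com/kotofos/sample-rest-server | app.py | mix_even
-- ===== SOURCE A (Python) =====
-- def mix_even(data):
--     mixed = []
--     i = 0
--     while i < len(data):
--         if i == len(data) - 1:
--             mixed.append(data[i])
--             break
--         mixed.append(data[i + 1])
--         mixed.append(data[i])
--         i += 2
--     return ''.join(mixed)
-- ===== SOURCE B (Python) =====
-- def mix_even(data):
--     evens = data[0::2]
--     odds = data[1::2]
--     result = []
--     for e, o in zip(evens, odds):
--         result.append(o)
--         result.append(e)
--     if len(evens) > len(odds):
--         result.append(evens[-1])
--     return ''.join(result)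
-- ===== Notes on version B (the rewrite author's own statement) =====
-- stated objective: faster
-- what changed: Replaces the index-stepping while loop with two stride-2 slices merged by zip (odd element before even, leftover even appended when the length is odd); the slicing/zip traversal runs in C-level loops instead of per-iteration Python index arithmetic.
import Mathlib
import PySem

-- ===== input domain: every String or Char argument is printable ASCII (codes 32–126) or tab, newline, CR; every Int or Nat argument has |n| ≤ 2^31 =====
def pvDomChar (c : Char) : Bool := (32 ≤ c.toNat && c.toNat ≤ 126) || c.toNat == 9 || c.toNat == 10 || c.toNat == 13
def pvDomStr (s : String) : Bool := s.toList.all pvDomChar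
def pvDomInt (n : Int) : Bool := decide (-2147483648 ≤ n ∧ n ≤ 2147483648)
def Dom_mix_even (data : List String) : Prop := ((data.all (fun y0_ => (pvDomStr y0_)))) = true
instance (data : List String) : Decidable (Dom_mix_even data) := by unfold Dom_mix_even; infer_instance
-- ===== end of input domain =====

-- B swaps adjacent pairs via two stride-2 slices merged with zip instead of A's index-stepping loop; return values agree everywhere (alternative decomposition, no side effects)

-- ===== PORT A =====
-- A's while loop steps i by 2: at each step, if i is the last index append data[i] and stop,
-- else append data[i+1] then data[i]. Transcribed as the obvious two-at-a-time recursion.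
def mixA : List String → List String
  | [] => []
  | [x] => [x]
  | x :: y :: rest => y :: x :: mixA rest

def mix_even (data : List String) : String := String.join (mixA data)

-- ===== PORT B =====
-- data[0::2] / data[1::2] (after dropping the first element): every second element
def every2 : List String → List String
  | [] => []
  | [x] => [x]
  | x :: _ :: rest => x :: every2 rest

def mix_even_alt (data : List String) : String :=
  let evens := every2 data
  let odds := every2 (data.drop 1)
  let result := (evens.zip odds).foldl (fun acc p => acc ++ [p.2, p.1]) []
  -- evens[-1] under the guard len(evens) > len(odds): evens is nonempty there, so getLast?.toList is that one element
  let result := if odds.length < evens.length then result ++ evens.getLast?.toList else result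
  String.join result

-- ===== PRECONDITION & SPEC =====
def Spec_mix_even (data : List String) (out : String) : Prop := out = mix_even_alt data
instance (data : List String) (out : String) : Decidable (Spec_mix_even data out) := by unfold Spec_mix_even; infer_instance

-- ===== CLAIM (what is proved, stated in full; the proofs are below) =====
def Claim_equal_mix_even : Prop := ∀ (data : List String), Dom_mix_even data → Spec_mix_even data (mix_even data)

-- ===== LEMMAS AND PROOFS =====
theorem every2_cons (a : String) (l : List String) :
    every2 (a :: l) = a :: every2 (l.drop 1) := by
  cases l <;> simp [every2]

theorem foldl_pairs (ps : List (String × String)) (acc : List String) :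
    ps.foldl (fun acc p => acc ++ [p.2, p.1]) acc = acc ++ ps.flatMap (fun p => [p.2, p.1]) := by
  induction ps generalizing acc with
  | nil => simp
  | cons p ps ih => simp [List.foldl, ih]

theorem ite_append {c : Prop} [Decidable c] (xs ys : List String) :
    (if c then xs ++ ys else xs) = xs ++ (if c then ys else []) := by
  split <;> simp

theorem mixB_eq_mixA (data : List String) :
    ((every2 data).zip (every2 (data.drop 1))).flatMap (fun p => [p.2, p.1]) ++
      (if (every2 (data.drop 1)).length < (every2 data).length then (every2 data).getLast?.toList else []) =
    mixA data := by
  induction data using mixA.induct with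
  | case1 => simp [every2, mixA]
  | case2 x => simp [every2, mixA]
  | case3 x y rest ih =>
      rw [show every2 (x :: y :: rest) = x :: every2 rest from rfl,
          show (x :: y :: rest).drop 1 = y :: rest from rfl, every2_cons]
      simp only [List.zip_cons_cons, List.flatMap_cons, List.length_cons, mixA, List.cons_append]
      rw [← ih]
      by_cases hcond : (every2 (rest.drop 1)).length < (every2 rest).length
      · cases hrest : every2 rest with
        | nil => rw [hrest] at hcond; simp at hcond
        | cons a t =>
            rw [hrest] at hcond
            rw [if_pos (by omega), if_pos hcond, List.getLast?_cons_cons]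
            simp
      · rw [if_neg (by omega), if_neg hcond]
        simp

theorem alt_eq (data : List String) : mix_even_alt data = mix_even data := by
  unfold mix_even_alt mix_even
  simp only [foldl_pairs, List.nil_append, ite_append, mixB_eq_mixA]

-- ===== VERDICT (by name: the statement is the Claim_ definition above) =====
theorem mix_even_spec : Claim_equal_mix_even := by
  intro data _
  unfold Spec_mix_even
  exact (alt_eq data).symm
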